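-- pv_equiv track=rewrite | github.com/rtviii/riboxyz | ribctl/lib/mod_transpose_bsites.py | hl_ixs
-- ===== SOURCE A (Python) =====
-- from typing import List
--
-- def hl_ixs(sequence:str,  ixs:List[int], color:int=91):
-- 	"""Highlight indices"""
-- 	CRED = '\033[{}m'.format(color)
-- 	CEND = '\033[0m'
-- 	_ = ''
-- 	for i,v in enumerate(sequence):
-- 		if i in ixs: _ += CRED + v +CEND
-- 		else: 	 	 _ += v
-- 	return _
-- ===== SOURCE B (Python) =====
-- def hl_ixs(sequence, ixs, color=91):
-- 	"""Highlight indices"""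
-- 	CRED = '\033[{}m'.format(color)
-- 	CEND = '\033[0m'
-- 	pos = sorted(i for i in set(ixs) if 0 <= i < len(sequence))
-- 	parts = []
-- 	cursor = 0
-- 	for p in pos:
-- 		parts.append(sequence[cursor:p])
-- 		parts.append(CRED + sequence[p:p+1] + CEND)
-- 		cursor = p + 1
-- 	parts.append(sequence[cursor:])
-- 	return ''.join(parts)
-- ===== Notes on version B (the rewrite author's own statement) =====
-- stated objective: faster
-- what changed: Instead of scanning ixs for every character of the sequence, B builds the sorted set of valid highlight positions once and emits untouched runs between them with string slicing.
import Mathlib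
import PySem

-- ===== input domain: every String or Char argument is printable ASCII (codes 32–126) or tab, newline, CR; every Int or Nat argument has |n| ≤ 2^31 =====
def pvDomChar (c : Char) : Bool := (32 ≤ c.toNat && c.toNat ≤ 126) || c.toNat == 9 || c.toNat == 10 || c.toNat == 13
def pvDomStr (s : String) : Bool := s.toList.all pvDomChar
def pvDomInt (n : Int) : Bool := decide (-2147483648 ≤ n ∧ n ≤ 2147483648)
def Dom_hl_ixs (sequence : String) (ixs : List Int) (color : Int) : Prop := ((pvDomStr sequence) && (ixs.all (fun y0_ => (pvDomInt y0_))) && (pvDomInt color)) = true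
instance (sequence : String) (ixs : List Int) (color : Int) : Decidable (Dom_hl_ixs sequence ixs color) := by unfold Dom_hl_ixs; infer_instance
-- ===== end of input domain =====

-- B replaces A's per-character membership scan of ixs by one sorted set of valid positions
-- and slice-copies the untouched runs between them (same return value, proved below).

-- ===== PORT A =====
def hl_ixs (sequence : String) (ixs : List Int) (color : Int) : String :=
  let CRED : List Char := ['\x1b', '['] ++ PySem.Int.toChars color ++ ['m']
  let CEND : List Char := ['\x1b', '[', '0', 'm']
  String.ofList ((PySem.List.enumerate sequence.toList).foldl
    (fun acc iv => if iv.1 ∈ ixs then acc ++ (CRED ++ [iv.2] ++ CEND) else acc ++ [iv.2]) [])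

-- ===== PORT B =====
def hl_ixs_alt (sequence : String) (ixs : List Int) (color : Int) : String :=
  let cs : List Char := sequence.toList
  let CRED : List Char := ['\x1b', '['] ++ PySem.Int.toChars color ++ ['m']
  let CEND : List Char := ['\x1b', '[', '0', 'm']
  let pos : List Int :=
    PySem.List.sorted ((PySem.Set.ofList ixs).filter
      (fun i => decide (0 ≤ i) && decide (i < (cs.length : Int)))) (fun x => x)
  let st : List (List Char) × Int :=
    pos.foldl (fun st p =>
      (st.1 ++ [PySem.List.slice cs (some st.2) (some p),
                CRED ++ PySem.List.slice cs (some p) (some (p + 1)) ++ CEND], p + 1))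
      ([], 0)
  String.ofList ((st.1 ++ [PySem.List.slice cs (some st.2) none]).flatten)

-- ===== PRECONDITION & SPEC =====
def Spec_hl_ixs (sequence : String) (ixs : List Int) (color : Int) (out : String) : Prop := out = hl_ixs_alt sequence ixs color
instance (sequence : String) (ixs : List Int) (color : Int) (out : String) : Decidable (Spec_hl_ixs sequence ixs color out) := by unfold Spec_hl_ixs; infer_instance

-- ===== CLAIM (what is proved, stated in full; the proofs are below) =====
def Claim_equal_hl_ixs : Prop := ∀ (sequence : String) (ixs : List Int) (color : Int), Dom_hl_ixs sequence ixs color → Spec_hl_ixs sequence ixs color (hl_ixs sequence ixs color)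

-- ===== LEMMAS AND PROOFS =====

/-- The chunk A emits for character `c` at index `i`. -/
def pvMark (ixs : List Int) (CRED CEND : List Char) (i : Int) (c : Char) : List Char :=
  if i ∈ ixs then CRED ++ [c] ++ CEND else [c]

/-- A's output from position `k` on, as a flatMap over the enumerated suffix. -/
def pvRend (cs : List Char) (ixs : List Int) (CRED CEND : List Char) (k : Nat) : List Char :=
  (PySem.List.enumerate (cs.drop k) (k : Int)).flatMap (fun iv => pvMark ixs CRED CEND iv.1 iv.2)

theorem pvRend_cons (cs : List Char) (ixs : List Int) (CRED CEND : List Char) (k : Nat)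
    (hk : k < cs.length) :
    pvRend cs ixs CRED CEND k
      = pvMark ixs CRED CEND (k : Int) (cs.getD k default) ++ pvRend cs ixs CRED CEND (k + 1) := by
  unfold pvRend
  rw [List.drop_eq_getElem_cons hk, PySem.List.enumerate_cons, List.flatMap_cons,
    List.getD_eq_getElem cs default hk]
  push_cast
  rfl

theorem pvRend_plain (cs : List Char) (ixs : List Int) (CRED CEND : List Char) (k : Nat)
    (h : ∀ i : Nat, k ≤ i → i < cs.length → (i : Int) ∉ ixs) :
    pvRend cs ixs CRED CEND k = cs.drop k := by
  unfold pvRend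
  have hcongr : ∀ iv ∈ PySem.List.enumerate (cs.drop k) (k : Int),
      pvMark ixs CRED CEND iv.1 iv.2 = [iv.2] := by
    intro iv hiv
    rcases (PySem.List.mem_enumerate_iff _ _ _).1 hiv with ⟨j, hj, rfl⟩
    have hjlen : k + j < cs.length := by
      have := cs.length_drop (i := k); omega
    have : ((k : Int) + (j : Int)) ∉ ixs := by
      have := h (k + j) (by omega) hjlen; push_cast at this ⊢; exact this
    simp [pvMark, this]
  rw [List.flatMap_congr hcongr]
  have : ∀ l : List (Int × Char), l.flatMap (fun iv => [iv.2]) = l.map Prod.snd := by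
    intro l; induction l with
    | nil => rfl
    | cons x t ih => simp [ih]
  rw [this, PySem.List.map_snd_enumerate]

theorem pvRend_split (cs : List Char) (ixs : List Int) (CRED CEND : List Char) :
    ∀ (d k : Nat), k + d < cs.length →
    (∀ i : Nat, k ≤ i → i < k + d → (i : Int) ∉ ixs) →
    pvRend cs ixs CRED CEND k
      = (cs.drop k).take d
        ++ pvMark ixs CRED CEND ((k + d : Nat) : Int) (cs.getD (k + d) default)
        ++ pvRend cs ixs CRED CEND (k + d + 1) := by
  intro d
  induction d with
  | zero =>
    intro k hlt _
    simpa using pvRend_cons cs ixs CRED CEND k (by omega)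
  | succ d ih =>
    intro k hlt hno
    have hk : k < cs.length := by omega
    have hknot : (k : Int) ∉ ixs := hno k (le_refl k) (by omega)
    rw [pvRend_cons cs ixs CRED CEND k hk]
    have hmark : pvMark ixs CRED CEND (k : Int) (cs.getD k default) = [cs.getD k default] := by
      simp [pvMark, hknot]
    rw [hmark, ih (k + 1) (by omega) (by intro i h1 h2; exact hno i (by omega) (by omega))]
    rw [List.getD_eq_getElem cs default hk]
    have harr : k + 1 + d = k + (d + 1) := by omega
    rw [List.drop_eq_getElem_cons hk, List.take_succ_cons]
    simp [harr]

/-- B's cursor loop over a sorted list of valid positions produces A's rendering. -/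
theorem pvLoop (cs : List Char) (ixs : List Int) (CRED CEND : List Char) :
    ∀ (pos : List Int) (k : Nat) (acc : List (List Char)),
    List.Pairwise (· < ·) pos →
    (∀ p ∈ pos, (k : Int) ≤ p ∧ p < (cs.length : Int)) →
    (∀ i : Nat, k ≤ i → i < cs.length → (((i : Int) ∈ pos) ↔ ((i : Int) ∈ ixs))) →
    ((pos.foldl (fun st p =>
        (st.1 ++ [PySem.List.slice cs (some st.2) (some p),
                  CRED ++ PySem.List.slice cs (some p) (some (p + 1)) ++ CEND], p + 1))
        (acc, (k : Int))).1
      ++ [PySem.List.slice cs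
            (some (pos.foldl (fun st p =>
              (st.1 ++ [PySem.List.slice cs (some st.2) (some p),
                        CRED ++ PySem.List.slice cs (some p) (some (p + 1)) ++ CEND], p + 1))
              (acc, (k : Int))).2) none]).flatten
    = acc.flatten ++ pvRend cs ixs CRED CEND k := by
  intro pos
  induction pos with
  | nil =>
    intro k acc _ _ hmem
    have hplain : pvRend cs ixs CRED CEND k = cs.drop k := by
      apply pvRend_plain
      intro i h1 h2 hin
      exact (List.not_mem_nil (a := (i : Int))) ((hmem i h1 h2).2 hin)
    simp [hplain, PySem.List.slice_from_natCast]
  | cons p rest ih =>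
    intro k acc hpw hbd hmem
    obtain ⟨hkp, hpn⟩ := hbd p (List.mem_cons_self)
    have hp0 : (0 : Int) ≤ p := le_trans (by exact_mod_cast Int.natCast_nonneg k) hkp
    set pn : Nat := p.toNat with hpn_def
    have hpcast : p = (pn : Int) := (Int.toNat_of_nonneg hp0).symm
    have hkpn : k ≤ pn := by omega
    have hpnlen : pn < cs.length := by omega
    simp only [List.foldl_cons]
    have hcursor : p + 1 = ((pn + 1 : Nat) : Int) := by omega
    rw [hcursor]
    rw [ih (pn + 1)
        (acc ++ [PySem.List.slice cs (some (k : Int)) (some p),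
                 CRED ++ PySem.List.slice cs (some p) (some ((pn + 1 : Nat) : Int)) ++ CEND])
        hpw.tail
        (by
          intro q hq
          have hlt := (List.pairwise_cons.1 hpw).1 q hq
          exact ⟨by omega, (hbd q (List.mem_cons_of_mem p hq)).2⟩)
        (by
          intro i h1 h2
          have hik : k ≤ i := by omega
          have hmi := hmem i hik h2
          rw [List.mem_cons] at hmi
          constructor
          · intro hi; exact hmi.1 (Or.inr hi)
          · intro hi
            rcases hmi.2 hi with heq | hin
            · exfalso; omega
            · exact hin)]
    have hsplit := pvRend_split cs ixs CRED CEND (pn - k) k (by omega)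
      (by
        intro i h1 h2 hin
        have h2' : i < cs.length := by omega
        have hnotin : (i : Int) ∉ p :: rest := by
          intro hc
          rw [List.mem_cons] at hc
          rcases hc with heq | hr
          · omega
          · have := (List.pairwise_cons.1 hpw).1 _ hr; omega
        exact hnotin ((hmem i h1 h2').2 hin))
    have hkd : k + (pn - k) = pn := by omega
    rw [hkd] at hsplit
    have hpmem : ((pn : Int)) ∈ ixs := by
      apply (hmem pn hkpn hpnlen).1
      rw [← hpcast]; exact List.mem_cons_self
    have hmarkp : pvMark ixs CRED CEND ((pn : Nat) : Int) (cs.getD pn default)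
        = CRED ++ [cs.getD pn default] ++ CEND := by simp [pvMark, hpmem]
    have hslice1 : PySem.List.slice cs (some (k : Int)) (some p) = (cs.drop k).take (pn - k) := by
      rw [hpcast, PySem.List.slice_natCast]
    have hslice2 : PySem.List.slice cs (some p) (some ((pn + 1 : Nat) : Int)) = [cs.getD pn default] := by
      rw [hpcast]
      rw [PySem.List.slice_natCast]
      have h1 : pn + 1 - pn = 1 := by omega
      rw [h1, List.drop_eq_getElem_cons hpnlen, List.getD_eq_getElem cs default hpnlen]
      rfl
    rw [hslice1, hslice2, hsplit, hmarkp]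
    simp

theorem pvPos_facts (cs : List Char) (ixs : List Int) :
    let pos := PySem.List.sorted ((PySem.Set.ofList ixs).filter
      (fun i => decide (0 ≤ i) && decide (i < (cs.length : Int)))) (fun x : Int => x)
    List.Pairwise (· < ·) pos ∧
    (∀ p ∈ pos, (0 : Int) ≤ p ∧ p < (cs.length : Int)) ∧
    (∀ i : Nat, i < cs.length → (((i : Int) ∈ pos) ↔ ((i : Int) ∈ ixs))) := by
  intro pos
  have hperm : pos.Perm ((PySem.Set.ofList ixs).filter
      (fun i => decide (0 ≤ i) && decide (i < (cs.length : Int)))) :=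
    PySem.List.sorted_perm _ _ _
  have hmemf : ∀ q : Int, q ∈ pos ↔ (q ∈ PySem.Set.ofList ixs ∧ 0 ≤ q ∧ q < (cs.length : Int)) := by
    intro q
    rw [hperm.mem_iff, List.mem_filter]
    simp
  have hnd : pos.Nodup := hperm.nodup_iff.2 ((PySem.Set.nodup_ofList ixs).filter _)
  refine ⟨?_, ?_, ?_⟩
  · have hle : List.Pairwise (fun a b : Int => a ≤ b) pos := by
      simpa using PySem.List.sorted_pairwise ((PySem.Set.ofList ixs).filter
        (fun i => decide (0 ≤ i) && decide (i < (cs.length : Int)))) (fun x : Int => x)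
    have := List.Pairwise.and hle (List.nodup_iff_pairwise_ne.mp hnd)
    exact this.imp (fun h => lt_of_le_of_ne h.1 h.2)
  · intro p hp
    exact ((hmemf p).1 hp).2
  · intro i hi
    rw [hmemf]
    rw [PySem.Set.mem_ofList]
    constructor
    · exact fun h => h.1
    · intro h
      exact ⟨h, by positivity, by exact_mod_cast hi⟩

-- ===== VERDICT (by name: the statement is the Claim_ definition above) =====
theorem hl_ixs_spec : Claim_equal_hl_ixs := by
  intro sequence ixs color _
  unfold Spec_hl_ixs hl_ixs hl_ixs_alt
  dsimp only
  set cs := sequence.toList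
  set CRED : List Char := ['\x1b', '['] ++ PySem.Int.toChars color ++ ['m'] with hCRED
  set CEND : List Char := ['\x1b', '[', '0', 'm'] with hCEND
  obtain ⟨hpw, hbd, hmem⟩ := pvPos_facts cs ixs
  have hB := pvLoop cs ixs CRED CEND
    (PySem.List.sorted ((PySem.Set.ofList ixs).filter
      (fun i => decide (0 ≤ i) && decide (i < (cs.length : Int)))) (fun x : Int => x))
    0 [] hpw (by simpa using hbd) (by simpa using hmem)
  simp only [Nat.cast_zero] at hB
  congr 1
  rw [hB]
  have hA : (PySem.List.enumerate cs).foldl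
      (fun acc iv => if iv.1 ∈ ixs then acc ++ (CRED ++ [iv.2] ++ CEND) else acc ++ [iv.2]) []
      = pvRend cs ixs CRED CEND 0 := by
    have hfun : (fun (acc : List Char) (iv : Int × Char) =>
        if iv.1 ∈ ixs then acc ++ (CRED ++ [iv.2] ++ CEND) else acc ++ [iv.2])
        = fun acc iv => acc ++ pvMark ixs CRED CEND iv.1 iv.2 := by
      funext acc iv
      by_cases h : iv.1 ∈ ixs <;> simp [pvMark, h]
    rw [hfun, PySem.List.foldl_append_eq_flatMap]
    unfold pvRend
    simp
  rw [hA]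
  simp
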